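-- pv_equiv track=rewrite | github.com/aguscurii05/IP-Algo-I | Parciales/SegundoParcial/Parcial.py | cuenta_posiciones_por_nacion
-- ===== SOURCE A (Python) =====
-- def cuenta_posiciones_por_nacion(naciones:list[str],torneos:dict[int,list[str]])->dict[str,list[str]]:
--     res:dict[str,list[int]]={}
--
--     #Con este for creo un dict con la estructura del res, pero con
--     #todos valores 0, el cual sera el esqueleto de la respuesta
--
--     for nacion in naciones:
--        res[nacion]=[0]*len(naciones)
--  #       for i in range(0,len(naciones),1):
-- #            res[nacion].append(0)
--     #Con este for para cada nacion recorro cada clave y elemento del dict y cuando estos elem. sean iguales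
--     #le sumo uno a esa posicion en res
--
--     for nacion in naciones:
--         for clave in torneos:
--             for i in range(0,len(torneos[clave]),1):
--                 if torneos[clave][i]==nacion:
--                     res[nacion][i]+=1
--     return res
-- ===== SOURCE B (Python) =====
-- def cuenta_posiciones_por_nacion(naciones: list[str], torneos: dict[int, list[str]]) -> dict[str, list[int]]:
--     # One pass over all tournament rows: for each entry, a dict position -> number of occurrences.
--     tabla = {}
--     for fila in torneos.values():
--         for i, entrada in enumerate(fila):
--             posiciones = tabla.setdefault(entrada, {})
--             posiciones[i] = posiciones.get(i, 0) + 1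
--     # Fill each nation's row straight from the table.
--     res = {nacion: [0] * len(naciones) for nacion in naciones}
--     for nacion in naciones:
--         for pos, cant in tabla.get(nacion, {}).items():
--             res[nacion][pos] += cant
--     return res
-- ===== Notes on version B (the rewrite author's own statement) =====
-- stated objective: faster
-- what changed: A rescans every tournament row once per nation (triple nested loop); B builds in one pass a table mapping each entry to its position->count dict and then fills each nation's row by table lookup. Pre_ excludes only the inputs on which both programs raise IndexError (a listed nation occurring at a position >= len(naciones)).
import Mathlib
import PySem

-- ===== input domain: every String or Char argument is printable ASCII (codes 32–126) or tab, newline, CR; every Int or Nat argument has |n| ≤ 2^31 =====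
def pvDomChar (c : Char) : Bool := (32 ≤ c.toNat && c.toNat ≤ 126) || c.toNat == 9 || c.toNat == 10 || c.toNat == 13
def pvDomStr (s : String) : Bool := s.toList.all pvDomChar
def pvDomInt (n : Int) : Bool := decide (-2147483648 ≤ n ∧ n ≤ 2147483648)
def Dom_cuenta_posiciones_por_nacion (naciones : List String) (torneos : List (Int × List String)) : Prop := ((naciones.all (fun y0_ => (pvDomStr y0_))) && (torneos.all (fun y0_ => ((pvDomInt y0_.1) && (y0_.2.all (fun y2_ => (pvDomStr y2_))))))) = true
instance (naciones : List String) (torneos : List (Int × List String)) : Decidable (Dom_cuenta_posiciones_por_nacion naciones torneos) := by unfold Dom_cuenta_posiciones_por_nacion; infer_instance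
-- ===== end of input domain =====

-- B replaces A's per-nation rescanning of every tournament row by one pass building an
-- entry → (position → count) table and a table-lookup fill of the result (objective: faster).

-- ===== PORT A =====
-- the skeleton loop 'for nacion in naciones: res[nacion] = [0]*len(naciones)' (shared verbatim by B's dict comprehension)
def pvInitRes (naciones : List String) : PySem.Dict String (List Int) :=
  naciones.foldl (fun r n => r.insert n (PySem.List.pyRepeat [(0 : Int)] (PySem.List.len naciones))) PySem.Dict.empty

-- body of A's outer loop: 'for clave in torneos: for i in range(0,len(torneos[clave]),1): if torneos[clave][i]==nacion: res[nacion][i]+=1'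
def pvStepA (d : PySem.Dict Int (List String)) (r : PySem.Dict String (List Int)) (nacion : String) : PySem.Dict String (List Int) :=
  d.keys.foldl (fun r clave =>
    (PySem.List.pyRange 0 (PySem.List.len (d.getD clave [])) 1).foldl (fun r i =>
      if PySem.List.pyGetD (d.getD clave []) i "" == nacion then
        r.modify nacion [] (fun row => PySem.List.pySetD row i (PySem.List.pyGetD row i 0 + 1))
      else r) r) r

def cuenta_posiciones_por_nacion (naciones : List String) (torneos : List (Int × List String)) : List (String × List Int) :=
  let d : PySem.Dict Int (List String) := PySem.Dict.ofList torneos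
  (naciones.foldl (fun r nacion => pvStepA d r nacion) (pvInitRes naciones)).items

-- ===== PORT B =====
-- inner-loop body of the counting pass: 'posiciones = tabla.setdefault(entrada, {}); posiciones[i] = posiciones.get(i, 0) + 1'
def pvTabStep (t : PySem.Dict String (PySem.Dict Int Int)) (p : Int × String) : PySem.Dict String (PySem.Dict Int Int) :=
  let t1 := t.setdefault p.2 PySem.Dict.empty
  let posiciones := t1.getD p.2 PySem.Dict.empty
  t1.insert p.2 (posiciones.insert p.1 (posiciones.getD p.1 0 + 1))

-- 'for fila in torneos.values(): for i, entrada in enumerate(fila): …'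
def pvTable (d : PySem.Dict Int (List String)) : PySem.Dict String (PySem.Dict Int Int) :=
  d.values.foldl (fun t fila => (PySem.List.enumerate fila).foldl pvTabStep t) PySem.Dict.empty

-- fill: 'for pos, cant in tabla.get(nacion, {}).items(): res[nacion][pos] += cant'
def pvStepB (tabla : PySem.Dict String (PySem.Dict Int Int)) (r : PySem.Dict String (List Int)) (nacion : String) : PySem.Dict String (List Int) :=
  (tabla.getD nacion PySem.Dict.empty).items.foldl
    (fun r q => r.modify nacion [] (fun row => PySem.List.pySetD row q.1 (PySem.List.pyGetD row q.1 0 + q.2))) r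

def cuenta_posiciones_por_nacion_alt (naciones : List String) (torneos : List (Int × List String)) : List (String × List Int) :=
  let d : PySem.Dict Int (List String) := PySem.Dict.ofList torneos
  let tabla := pvTable d
  (naciones.foldl (fun r nacion => pvStepB tabla r nacion) (pvInitRes naciones)).items

-- ===== PRECONDITION & SPEC =====
-- Pre_ excludes exactly the inputs where both programs raise IndexError: some tournament row
-- holds a listed nation at a position ≥ len(naciones), past the end of that nation's result row.
def Pre_cuenta_posiciones_por_nacion (naciones : List String) (torneos : List (Int × List String)) : Prop :=
  ∀ v ∈ (PySem.Dict.ofList torneos : PySem.Dict Int (List String)).values,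
    ∀ p ∈ PySem.List.enumerate v, p.2 ∈ naciones → p.1 < (naciones.length : Int)
instance (naciones : List String) (torneos : List (Int × List String)) : Decidable (Pre_cuenta_posiciones_por_nacion naciones torneos) := by unfold Pre_cuenta_posiciones_por_nacion; infer_instance

def pvWitness_cuenta_posiciones_por_nacion : List String × (List (Int × List String)) :=
  (["arg", "bra"], [(1, ["bra", "arg"]), (2, ["arg"])])

def Spec_cuenta_posiciones_por_nacion (naciones : List String) (torneos : List (Int × List String)) (out : List (String × List Int)) : Prop := out = cuenta_posiciones_por_nacion_alt naciones torneos
instance (naciones : List String) (torneos : List (Int × List String)) (out : List (String × List Int)) : Decidable (Spec_cuenta_posiciones_por_nacion naciones torneos out) := by unfold Spec_cuenta_posiciones_por_nacion; infer_instance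

-- ===== CLAIM (what is proved, stated in full; the proofs are below) =====
def Claim_equal_cuenta_posiciones_por_nacion : Prop := ∀ (naciones : List String) (torneos : List (Int × List String)), Dom_cuenta_posiciones_por_nacion naciones torneos → Pre_cuenta_posiciones_por_nacion naciones torneos → Spec_cuenta_posiciones_por_nacion naciones torneos (cuenta_posiciones_por_nacion naciones torneos)

-- ===== LEMMAS AND PROOFS =====

-- the (entry, position) pairs of all tournament rows, flattened (what pvTable counts)
def pvKeysOf (d : PySem.Dict Int (List String)) : List (String × Int) :=
  d.values.flatMap (fun fila => (PySem.List.enumerate fila).map (fun p => (p.2, p.1)))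

-- the positions A's inner loops increment for a fixed nacion, in A's traversal order
def pvPos (d : PySem.Dict Int (List String)) (nacion : String) : List Int :=
  d.keys.flatMap (fun clave =>
    (PySem.List.pyRange 0 (PySem.List.len (d.getD clave [])) 1).filter
      (fun i => PySem.List.pyGetD (d.getD clave []) i "" == nacion))

theorem pv_foldl_flatMap {α β γ : Type} (g : α → List β) (f : γ → β → γ) (l : List α) (init : γ) :
    (l.flatMap g).foldl f init = l.foldl (fun c a => (g a).foldl f c) init := by
  induction l generalizing init with
  | nil => rfl
  | cons x xs ih => simp [List.flatMap_cons, List.foldl_append, ih]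

-- setdefault with the default it was read back with leaves every getD unchanged
theorem pv_setdefault_getD (t : PySem.Dict String (PySem.Dict Int Int)) (k n : String) :
    (t.setdefault k PySem.Dict.empty).getD n PySem.Dict.empty = t.getD n PySem.Dict.empty := by
  by_cases h : n = k
  · subst h; exact PySem.Dict.getD_setdefault_self t n PySem.Dict.empty PySem.Dict.empty
  · rw [PySem.Dict.getD_eq_get?_getD, PySem.Dict.get?_setdefault_of_ne _ _ h,
      ← PySem.Dict.getD_eq_get?_getD]

-- one induction characterising the counting pass: per-entry counts, nodup inner keys,
-- and inner keys only at recorded (entry, position) pairs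
theorem pv_table_core (L : List (Int × String)) (t : PySem.Dict String (PySem.Dict Int Int)) (n : String) :
    (∀ i : Int, ((L.foldl pvTabStep t).getD n PySem.Dict.empty).getD i 0
        = (t.getD n PySem.Dict.empty).getD i 0 + ((L.map (fun q => (q.2, q.1))).count (n, i) : Int))
    ∧ ((t.getD n PySem.Dict.empty).keys.Nodup → ((L.foldl pvTabStep t).getD n PySem.Dict.empty).keys.Nodup)
    ∧ (∀ k, k ∈ ((L.foldl pvTabStep t).getD n PySem.Dict.empty).keys →
        k ∈ (t.getD n PySem.Dict.empty).keys ∨ (n, k) ∈ L.map (fun q => (q.2, q.1))) := by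
  induction L generalizing t with
  | nil => exact ⟨fun i => by simp, fun h => h, fun k hk => Or.inl hk⟩
  | cons q L ih =>
    have hstep : ∀ m : String, (pvTabStep t q).getD m PySem.Dict.empty
        = if m = q.2 then (t.getD q.2 PySem.Dict.empty).insert q.1
            ((t.getD q.2 PySem.Dict.empty).getD q.1 0 + 1)
          else t.getD m PySem.Dict.empty := by
      intro m
      unfold pvTabStep
      rw [PySem.Dict.getD_insert, pv_setdefault_getD, pv_setdefault_getD]
    obtain ⟨ihc, ihn, ihk⟩ := ih (pvTabStep t q)
    refine ⟨fun i => ?_, fun hnd => ?_, fun k hk => ?_⟩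
    · rw [List.foldl_cons, ihc i, hstep n]
      by_cases hn : n = q.2
      · subst hn
        rw [if_pos rfl, PySem.Dict.getD_insert]
        by_cases hi : i = q.1
        · subst hi
          rw [if_pos rfl, List.map_cons, List.count_cons_self]
          push_cast; ring
        · rw [if_neg hi, List.map_cons,
            List.count_cons_of_ne (by simp [Prod.ext_iff]; intro _; omega)]
      · rw [if_neg hn, List.map_cons,
          List.count_cons_of_ne (by simp [Prod.ext_iff]; intro h; exact absurd h.symm hn)]
    · rw [List.foldl_cons]
      apply ihn
      rw [hstep n]
      by_cases hn : n = q.2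
      · subst hn; rw [if_pos rfl]; exact PySem.Dict.nodup_keys_insert _ _ _ hnd
      · rwa [if_neg hn]
    · rw [List.foldl_cons] at hk
      rcases ihk k hk with h | h
      · rw [hstep n] at h
        by_cases hn : n = q.2
        · subst hn; rw [if_pos rfl] at h
          rcases (PySem.Dict.mem_keys_insert _ _ _ _).mp h with h' | h'
          · exact Or.inr (by simp [h'])
          · exact Or.inl h'
        · rw [if_neg hn] at h; exact Or.inl h
      · exact Or.inr (by simp [List.mem_cons]; right; simpa using h)

theorem pvTable_getD (d : PySem.Dict Int (List String)) (n : String) (i : Int) :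
    ((pvTable d).getD n PySem.Dict.empty).getD i 0 = ((pvKeysOf d).count (n, i) : Int) := by
  unfold pvTable
  rw [← pv_foldl_flatMap PySem.List.enumerate pvTabStep]
  have h := (pv_table_core (d.values.flatMap PySem.List.enumerate) PySem.Dict.empty n).1 i
  rw [h]
  unfold pvKeysOf
  rw [List.map_flatMap]
  simp

theorem pvTable_nodup (d : PySem.Dict Int (List String)) (n : String) :
    ((pvTable d).getD n PySem.Dict.empty).keys.Nodup := by
  unfold pvTable
  rw [← pv_foldl_flatMap PySem.List.enumerate pvTabStep]
  exact (pv_table_core (d.values.flatMap PySem.List.enumerate) PySem.Dict.empty n).2.1 (by simp)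

theorem pvTable_keys_mem (d : PySem.Dict Int (List String)) (n : String) (k : Int)
    (hk : k ∈ ((pvTable d).getD n PySem.Dict.empty).keys) : (n, k) ∈ pvKeysOf d := by
  unfold pvTable at hk
  rw [← pv_foldl_flatMap PySem.List.enumerate pvTabStep] at hk
  rcases (pv_table_core (d.values.flatMap PySem.List.enumerate) PySem.Dict.empty n).2.2 k hk with h | h
  · simp at h
  · unfold pvKeysOf; rw [List.map_flatMap] at h; simpa using h

theorem pv_per_fila (fila : List String) (n : String) (i : Int) :
    ((PySem.List.enumerate fila).map (fun p => (p.2, p.1))).count (n, i)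
      = ((PySem.List.pyRange 0 (PySem.List.len fila) 1).filter
          (fun j => PySem.List.pyGetD fila j "" == n)).count i := by
  have hr : PySem.List.pyRange 0 (PySem.List.len fila) 1 = (PySem.List.enumerate fila).map (·.1) := by
    rw [PySem.List.map_fst_enumerate]; simp [PySem.List.len_eq]
  rw [hr, List.filter_map, List.count_eq_countP, List.count_eq_countP, List.countP_map,
    List.countP_map, List.countP_filter]
  apply List.countP_congr
  intro p hp
  rcases ((PySem.List.mem_enumerate_iff _ _ _).mp hp) with ⟨k, hk, rfl⟩
  simp only [Function.comp_apply, zero_add]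
  rw [PySem.List.pyGetD_natCast]
  simp [hk, Prod.ext_iff, List.getD_eq_getElem?_getD]
  constructor
  · rintro ⟨h1, h2⟩; exact ⟨h2, h1⟩
  · rintro ⟨h1, h2⟩; exact ⟨h2, h1⟩

theorem pv_count_flatMap {α β : Type} [BEq β] (g : α → List β) (l : List α) (a : β) :
    (l.flatMap g).count a = (l.map (fun x => (g x).count a)).sum := by
  induction l with
  | nil => rfl
  | cons x xs ih => simp [List.flatMap_cons, List.count_append, ih]

theorem pv_count_keys_pos (d : PySem.Dict Int (List String)) (hnd : d.keys.Nodup)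
    (nacion : String) (i : Int) :
    (pvKeysOf d).count (nacion, i) = (pvPos d nacion).count i := by
  unfold pvKeysOf pvPos
  rw [PySem.Dict.values_eq_map_keys d hnd [], List.flatMap_map, pv_count_flatMap,
    pv_count_flatMap]
  congr 1
  apply List.map_congr_left
  intro clave _
  exact pv_per_fila (d.getD clave []) nacion i

-- the fill loop on one row, weighted: adding q.2 at index q.1 for each item
theorem pv_row_core (Q : List (Int × Int)) (row : List Int)
    (hb : ∀ q ∈ Q, 0 ≤ q.1 ∧ q.1 < (row.length : Int)) :
    (Q.foldl (fun row q => PySem.List.pySetD row q.1 (PySem.List.pyGetD row q.1 0 + q.2)) row).length = row.length ∧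
    ∀ j : Nat, (Q.foldl (fun row q => PySem.List.pySetD row q.1 (PySem.List.pyGetD row q.1 0 + q.2)) row)[j]?
      = row[j]?.map (fun v => v + ((Q.filter (fun q => q.1 == (j : Int))).map (·.2)).sum) := by
  induction Q generalizing row with
  | nil => simp
  | cons q Q ih =>
    obtain ⟨h0, hlt⟩ := hb q (by simp)
    have hi : q.1.toNat < row.length := by omega
    have hstep : PySem.List.pySetD row q.1 (PySem.List.pyGetD row q.1 0 + q.2)
        = row.set q.1.toNat (row[q.1.toNat] + q.2) := by
      rw [PySem.List.pySetD_of_nonneg _ _ h0, PySem.List.pyGetD_of_nonneg _ _ h0,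
        List.getD_eq_getElem?_getD]
      simp [hi]
    simp only [List.foldl_cons, hstep]
    have hb' : ∀ x ∈ Q, 0 ≤ x.1 ∧ x.1 < ((row.set q.1.toNat (row[q.1.toNat] + q.2)).length : Int) := by
      intro x hx; simpa using hb x (by simp [hx])
    obtain ⟨ihl, ihg⟩ := ih _ hb'
    refine ⟨by simpa using ihl, fun j => ?_⟩
    rw [ihg j, List.getElem?_set]
    by_cases hji : q.1.toNat = j
    · subst hji
      have : q.1 = (q.1.toNat : Int) := by omega
      simp [hi, ← this]
      ring
    · have : ¬ (q.1 == (j : Int)) := by simp; omega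
      simp [hji, this]

-- the whole fill loop of B over one inner dict equals a per-position table lookup
theorem pv_row_items (inner : PySem.Dict Int Int) (row : List Int)
    (hnd : inner.keys.Nodup) (hb : ∀ k ∈ inner.keys, 0 ≤ k ∧ k < (row.length : Int)) :
    inner.items.foldl (fun row q => PySem.List.pySetD row q.1 (PySem.List.pyGetD row q.1 0 + q.2)) row
      = (PySem.List.enumerate row).map (fun p => p.2 + inner.getD p.1 0) := by
  have hitems : inner.items = inner.keys.map (fun k => (k, inner.getD k 0)) :=
    PySem.Dict.items_eq_map_keys inner hnd 0
  have hb' : ∀ q ∈ inner.items, 0 ≤ q.1 ∧ q.1 < (row.length : Int) := by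
    intro q hq
    rw [hitems] at hq
    rcases List.mem_map.mp hq with ⟨k, hk, rfl⟩
    exact hb k hk
  obtain ⟨_, hg⟩ := pv_row_core inner.items row hb'
  apply List.ext_getElem?
  intro j
  rw [hg j, List.getElem?_map, PySem.List.getElem?_enumerate]
  have hsum : ((inner.items.filter (fun q => q.1 == (j : Int))).map (·.2)).sum
      = inner.getD (j : Int) 0 := by
    rw [hitems, List.filter_map, List.map_map]
    have hf : ((fun q : Int × Int => q.1 == (j : Int)) ∘ fun k => (k, inner.getD k 0))
        = fun k => k == (j : Int) := rfl
    rw [hf, List.filter_beq]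
    by_cases hj : (j : Int) ∈ inner.keys
    · rw [List.count_eq_one_of_mem hnd hj]
      simp
    · rw [List.count_eq_zero_of_not_mem hj]
      have h0 : inner.get? (j : Int) = none :=
        (PySem.Dict.get?_eq_none_iff_not_mem_keys _ _).mpr hj
      rw [PySem.Dict.getD_eq_get?_getD, h0]
      simp
  rw [hsum]
  cases row[j]? <;> simp

theorem pv_insert_getD_self (r : PySem.Dict String (List Int)) (k : String)
    (hk : k ∈ r.keys) (hnd : r.keys.Nodup) : r.insert k (r.getD k []) = r := by
  apply PySem.Dict.ext
  rw [PySem.Dict.items_insert_of_contains _ _ ((PySem.Dict.contains_iff_mem_keys _ _).mpr hk)]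
  conv_rhs => rw [← List.map_id r.items]
  apply List.map_congr_left
  intro p hp
  by_cases hpk : p.1 == k
  · have hpk' : p.1 = k := by simpa using hpk
    have : r.getD p.1 [] = p.2 := PySem.Dict.getD_of_mem_items _ (by simpa using hp) hnd []
    simp [← hpk', this]
  · simp [hpk]

theorem pv_foldl_modify_key {α : Type} (Q : List α) (r : PySem.Dict String (List Int)) (k : String)
    (f : List Int → α → List Int) (hk : k ∈ r.keys) (hnd : r.keys.Nodup) :
    Q.foldl (fun r q => r.modify k [] (fun row => f row q)) r
      = r.insert k (Q.foldl f (r.getD k [])) := by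
  induction Q generalizing r with
  | nil => exact (pv_insert_getD_self r k hk hnd).symm ▸ rfl
  | cons q Q ih =>
    have hc : r.contains k = true := (PySem.Dict.contains_iff_mem_keys _ _).mpr hk
    have hkeys : (r.modify k [] (fun row => f row q)).keys = r.keys := by
      rw [PySem.Dict.keys_modify, PySem.Dict.keys_insert_of_contains _ _ hc]
    simp only [List.foldl_cons]
    rw [ih (r.modify k [] (fun row => f row q)) (hkeys ▸ hk) (hkeys ▸ hnd)]
    have hm : r.modify k [] (fun row => f row q) = r.insert k (f (r.getD k []) q) := rfl
    rw [hm, PySem.Dict.insert_insert_self, PySem.Dict.getD_insert_self]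

theorem pv_hb (naciones : List String) (d : PySem.Dict Int (List String)) (hndd : d.keys.Nodup)
    (hpre : ∀ v ∈ d.values, ∀ p ∈ PySem.List.enumerate v, p.2 ∈ naciones → p.1 < (naciones.length : Int))
    (nacion : String) (hnac : nacion ∈ naciones) :
    ∀ i ∈ pvPos d nacion, 0 ≤ i ∧ i < (naciones.length : Int) := by
  intro i hi
  unfold pvPos at hi
  rcases List.mem_flatMap.mp hi with ⟨clave, hclave, hfil⟩
  rcases List.mem_filter.mp hfil with ⟨hrange, hbeq⟩
  obtain ⟨h0, hlen⟩ := PySem.List.mem_pyRange_one.mp hrange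
  rw [PySem.List.len_eq] at hlen
  have hlt : i.toNat < (d.getD clave []).length := by omega
  refine ⟨h0, ?_⟩
  have hval : d.getD clave [] ∈ d.values := by
    rw [PySem.Dict.values_eq_map_keys d hndd []]
    exact List.mem_map_of_mem hclave
  have hget : (d.getD clave [])[i.toNat] = nacion := by
    rw [PySem.List.pyGetD_of_nonneg _ _ h0, List.getD_eq_getElem?_getD] at hbeq
    simp [hlt] at hbeq
    exact hbeq
  have hp : ((i, nacion) : Int × String) ∈ PySem.List.enumerate (d.getD clave []) :=
    (PySem.List.mem_enumerate_iff _ _ _).mpr ⟨i.toNat, hlt, by rw [hget]; simp; omega⟩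
  exact hpre _ hval _ hp hnac

-- the fill step of B, on an invariant state, is one insert of the looked-up row
theorem pv_stepB_insert (naciones : List String) (d : PySem.Dict Int (List String))
    (hndd : d.keys.Nodup)
    (hpre : ∀ v ∈ d.values, ∀ p ∈ PySem.List.enumerate v, p.2 ∈ naciones → p.1 < (naciones.length : Int))
    (r : PySem.Dict String (List Int)) (nacion : String) (hnac : nacion ∈ naciones)
    (hk : nacion ∈ r.keys) (hnd : r.keys.Nodup)
    (hrow : (r.getD nacion []).length = naciones.length) :
    pvStepB (pvTable d) r nacion
      = r.insert nacion ((PySem.List.enumerate (r.getD nacion [])).map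
          (fun p => p.2 + ((pvTable d).getD nacion PySem.Dict.empty).getD p.1 0)) := by
  unfold pvStepB
  rw [pv_foldl_modify_key _ _ _ _ hk hnd]
  congr 1
  apply pv_row_items _ _ (pvTable_nodup d nacion)
  intro k hkmem
  have hmemK : (nacion, k) ∈ pvKeysOf d := pvTable_keys_mem d nacion k hkmem
  have hcount : 0 < (pvKeysOf d).count (nacion, k) := List.count_pos_iff.mpr hmemK
  rw [pv_count_keys_pos d hndd] at hcount
  have hmemP : k ∈ pvPos d nacion := List.count_pos_iff.mp hcount
  rw [hrow]
  exact pv_hb naciones d hndd hpre nacion hnac k hmemP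

-- A's own per-row increment loop (unit weights) as a per-position count
theorem pv_row_foldl (I : List Int) (row : List Int)
    (hb : ∀ i ∈ I, 0 ≤ i ∧ i < (row.length : Int)) :
    I.foldl (fun row i => PySem.List.pySetD row i (PySem.List.pyGetD row i 0 + 1)) row
      = (PySem.List.enumerate row).map (fun p => p.2 + (I.count p.1 : Int)) := by
  have hQ : ∀ q ∈ I.map (fun i => ((i, 1) : Int × Int)), 0 ≤ q.1 ∧ q.1 < (row.length : Int) := by
    intro q hq; rcases List.mem_map.mp hq with ⟨i, hi, rfl⟩; exact hb i hi
  obtain ⟨_, hg⟩ := pv_row_core (I.map (fun i => ((i, 1) : Int × Int))) row hQ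
  rw [List.foldl_map] at hg
  apply List.ext_getElem?
  intro j
  rw [hg j, List.getElem?_map, PySem.List.getElem?_enumerate]
  have hsum : (((I.map (fun i => ((i, 1) : Int × Int))).filter (fun q => q.1 == (j : Int))).map (·.2)).sum
      = (I.count (j : Int) : Int) := by
    rw [List.filter_map, List.map_map]
    have hf : ((fun q : Int × Int => q.1 == (j : Int)) ∘ fun i => ((i, 1) : Int × Int))
        = fun i => i == (j : Int) := rfl
    rw [hf, List.filter_beq, List.map_replicate, List.sum_replicate]
    simp
  rw [hsum]
  cases row[j]? <;> simp

theorem pv_step_eq (naciones : List String) (d : PySem.Dict Int (List String))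
    (hndd : d.keys.Nodup)
    (hpre : ∀ v ∈ d.values, ∀ p ∈ PySem.List.enumerate v, p.2 ∈ naciones → p.1 < (naciones.length : Int))
    (r : PySem.Dict String (List Int)) (nacion : String) (hnac : nacion ∈ naciones)
    (hk : nacion ∈ r.keys) (hnd : r.keys.Nodup)
    (hrow : (r.getD nacion []).length = naciones.length) :
    pvStepA d r nacion = pvStepB (pvTable d) r nacion := by
  unfold pvStepA
  have h1 : ∀ clave (r : PySem.Dict String (List Int)),
      (PySem.List.pyRange 0 (PySem.List.len (d.getD clave [])) 1).foldl (fun r i =>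
        if PySem.List.pyGetD (d.getD clave []) i "" == nacion then
          r.modify nacion [] (fun row => PySem.List.pySetD row i (PySem.List.pyGetD row i 0 + 1))
        else r) r
      = ((PySem.List.pyRange 0 (PySem.List.len (d.getD clave [])) 1).filter
          (fun i => PySem.List.pyGetD (d.getD clave []) i "" == nacion)).foldl
          (fun r i => r.modify nacion [] (fun row => PySem.List.pySetD row i (PySem.List.pyGetD row i 0 + 1))) r := by
    intro clave r
    exact PySem.List.foldl_if_eq_foldl_filter _ _ _ _
  simp only [h1]
  rw [← pv_foldl_flatMap (fun clave =>
      (PySem.List.pyRange 0 (PySem.List.len (d.getD clave [])) 1).filter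
        (fun i => PySem.List.pyGetD (d.getD clave []) i "" == nacion))]
  rw [show (d.keys.flatMap fun clave =>
      (PySem.List.pyRange 0 (PySem.List.len (d.getD clave [])) 1).filter
        (fun i => PySem.List.pyGetD (d.getD clave []) i "" == nacion)) = pvPos d nacion from rfl]
  rw [pv_foldl_modify_key _ _ _ _ hk hnd]
  rw [pv_row_foldl _ _ (by rw [hrow]; exact pv_hb naciones d hndd hpre nacion hnac)]
  rw [pv_stepB_insert naciones d hndd hpre r nacion hnac hk hnd hrow]
  congr 1
  apply List.map_congr_left
  intro p _
  rw [pvTable_getD, pv_count_keys_pos d hndd]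

theorem pv_foldl_eq_of_inv {α σ : Type} (P : σ → Prop) (f g : σ → α → σ) (l : List α) (init : σ)
    (h0 : P init)
    (hpres : ∀ s a, a ∈ l → P s → P (g s a))
    (hagree : ∀ s a, a ∈ l → P s → f s a = g s a) :
    l.foldl f init = l.foldl g init := by
  induction l generalizing init with
  | nil => rfl
  | cons x xs ih =>
    simp only [List.foldl_cons]
    rw [hagree init x (by simp) h0]
    exact ih (g init x) (hpres init x (by simp) h0)
      (fun s a ha hs => hpres s a (by simp [ha]) hs)
      (fun s a ha hs => hagree s a (by simp [ha]) hs)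

theorem pv_init_getD (v : List Int) (n : String)
    (r : PySem.Dict String (List Int)) (l : List String) :
    (l.foldl (fun r x => r.insert x v) r).getD n [] = if n ∈ l then v else r.getD n [] := by
  induction l generalizing r with
  | nil => simp
  | cons x xs ih =>
    simp only [List.foldl_cons, ih, List.mem_cons]
    by_cases hx : n ∈ xs
    · simp [hx]
    · by_cases hnx : n = x <;> simp [hx, hnx, PySem.Dict.getD_insert]

-- ===== VERDICT (by name: the statement is the Claim_ definition above) =====
theorem cuenta_posiciones_por_nacion_spec : Claim_equal_cuenta_posiciones_por_nacion := by
  intro naciones torneos _ hpre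
  unfold Spec_cuenta_posiciones_por_nacion cuenta_posiciones_por_nacion cuenta_posiciones_por_nacion_alt
  simp only []
  congr 1
  apply pv_foldl_eq_of_inv (P := fun r : PySem.Dict String (List Int) =>
    (∀ n ∈ naciones, n ∈ r.keys) ∧ r.keys.Nodup ∧
      ∀ n ∈ naciones, (r.getD n []).length = naciones.length)
  · -- the skeleton dict satisfies the invariant
    unfold pvInitRes
    refine ⟨?_, ?_, ?_⟩
    · intro n hn
      rw [PySem.Dict.keys_foldl_insert naciones (fun _ _ => PySem.List.pyRepeat [(0 : Int)] (PySem.List.len naciones)) PySem.Dict.empty]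
      simp only [PySem.Dict.keys_empty]
      exact (PySem.Set.mem_ofList naciones n).mpr hn
    · exact PySem.Dict.nodup_keys_foldl_insert _ _ _ (by simp)
    · intro n hn
      rw [pv_init_getD, if_pos hn, PySem.List.pyRepeat_singleton, List.length_replicate,
        PySem.List.len_eq]
      omega
  · -- each fill step of B preserves the invariant
    rintro r nacion hmem ⟨hks, hnd, hlen⟩
    rw [pv_stepB_insert naciones _ (PySem.Dict.nodup_keys_ofList _) hpre r nacion hmem
      (hks _ hmem) hnd (hlen _ hmem)]
    have hc : r.contains nacion = true := (PySem.Dict.contains_iff_mem_keys _ _).mpr (hks _ hmem)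
    have hkeys := PySem.Dict.keys_insert_of_contains (d := r)
      (v := (PySem.List.enumerate (r.getD nacion [])).map
        (fun p => p.2 + ((pvTable (PySem.Dict.ofList torneos)).getD nacion PySem.Dict.empty).getD p.1 0)) hc
    refine ⟨fun n hn => hkeys ▸ hks n hn, hkeys ▸ hnd, ?_⟩
    intro n hn
    rw [PySem.Dict.getD_insert]
    by_cases hne : n = nacion
    · rw [if_pos hne, List.length_map, PySem.List.length_enumerate]
      exact hlen _ hmem
    · rw [if_neg hne]
      exact hlen n hn
  · -- on invariant states A's scanning step equals B's fill step
    rintro r nacion hmem ⟨hks, hnd, hlen⟩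
    exact pv_step_eq naciones _ (PySem.Dict.nodup_keys_ofList _) hpre r nacion hmem
      (hks _ hmem) hnd (hlen _ hmem)
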